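-- pv_equiv track=rewrite | github.com/list12356/random_search | models/note_rnn/evaluator.py | detect_low_unique
-- ===== SOURCE A (Python) =====
-- NOTE_OFF = 0
--
-- NO_EVENT = 1
--
-- def detect_low_unique(composition):
--     """Checks a composition to see if the lowest note within it is repeated.
--
--     Args:
--         composition: A list of integers representing the notes in the piece.
--     Returns:
--         True if the lowest note was unique, False otherwise.
--     """
--     no_special_events = [x for x in composition
--                                              if x != NO_EVENT and x != NOTE_OFF]
--     if no_special_events:
--         min_note = min(no_special_events)
--         if list(composition).count(min_note) == 1:
--             return True
--     return False
-- ===== SOURCE B (Python) =====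
-- NOTE_OFF = 0
--
-- NO_EVENT = 1
--
-- def detect_low_unique(composition):
--     best = None
--     count = 0
--     for x in composition:
--         if x == NO_EVENT or x == NOTE_OFF:
--             continue
--         if best is None or x < best:
--             best = x
--             count = 1
--         elif x == best:
--             count += 1
--     return best is not None and count == 1
-- ===== Notes on version B (the rewrite author's own statement) =====
-- stated objective: alternative
-- what changed: Replaces A's filter-then-min-then-rescan-and-count (three passes building an intermediate list) with a single left-to-right pass that tracks the running minimum and a count that resets whenever a new minimum appears.
import Mathlib
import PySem

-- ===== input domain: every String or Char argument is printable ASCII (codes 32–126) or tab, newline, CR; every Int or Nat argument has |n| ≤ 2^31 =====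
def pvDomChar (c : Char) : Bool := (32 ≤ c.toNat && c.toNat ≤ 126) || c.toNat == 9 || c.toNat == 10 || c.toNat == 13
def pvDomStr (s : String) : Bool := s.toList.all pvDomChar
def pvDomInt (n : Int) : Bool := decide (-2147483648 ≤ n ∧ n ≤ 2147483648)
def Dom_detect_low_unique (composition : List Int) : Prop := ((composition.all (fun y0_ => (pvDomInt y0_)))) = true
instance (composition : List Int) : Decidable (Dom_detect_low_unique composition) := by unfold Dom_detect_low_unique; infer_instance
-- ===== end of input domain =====

-- B replaces A's filter-then-min-then-count-rescan by a single pass with a running minimum and a count that resets on each new minimum (alternative decomposition, same asymptotic cost).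


-- ===== PORT A =====
-- A: filter out NO_EVENT=1 and NOTE_OFF=0, take min of the filtered list, count that min in the full list.
def detect_low_unique (composition : List Int) : Bool :=
  let no_special_events := composition.filter (fun x => decide (x ≠ 1) && decide (x ≠ 0))
  match PySem.List.min? no_special_events (fun x => x) with
  | none => false
  | some min_note => decide (PySem.List.count composition min_note = 1)

-- ===== PORT B =====
-- B: one fold over the composition carrying (running minimum, its occurrence count); the count resets to 1 whenever a strictly smaller note is seen.
def pvStepB (s : Option Int × Int) (x : Int) : Option Int × Int :=
  if x == 1 || x == 0 then s
  else
    match s.1 with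
    | none => (some x, 1)
    | some b =>
      if x < b then (some x, 1)
      else if x == b then (some b, s.2 + 1)
      else s

def detect_low_unique_alt (composition : List Int) : Bool :=
  let st := composition.foldl pvStepB (none, 0)
  st.1.isSome && st.2 == 1

-- ===== PRECONDITION & SPEC =====
def Spec_detect_low_unique (composition : List Int) (out : Bool) : Prop := out = detect_low_unique_alt composition
instance (composition : List Int) (out : Bool) : Decidable (Spec_detect_low_unique composition out) := by unfold Spec_detect_low_unique; infer_instance

-- ===== CLAIM (what is proved, stated in full; the proofs are below) =====
def Claim_equal_detect_low_unique : Prop := ∀ (composition : List Int), Dom_detect_low_unique composition → Spec_detect_low_unique composition (detect_low_unique composition)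

-- ===== LEMMAS AND PROOFS =====

-- specification of B's fold state after seeing filtered prefix L
def pvStSpec (L : List Int) : Option Int × Int :=
  match PySem.List.min? L (fun x => x) with
  | none => (none, 0)
  | some m => (some m, List.count m L)

lemma min?_append_singleton (L : List Int) (x m : Int)
    (h : PySem.List.min? L (fun y => y) = some m) :
    PySem.List.min? (L ++ [x]) (fun y => y) = some (min m x) := by
  cases L with
  | nil =>
    rw [(PySem.List.min?_eq_none_iff ([] : List Int) (fun y => y)).mpr rfl] at h
    exact absurd h (by simp)
  | cons a t =>
    rw [PySem.List.min?_id_cons] at h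
    have hm : t.foldl min a = m := Option.some.inj h
    rw [List.cons_append, PySem.List.min?_id_cons, List.foldl_append]
    simp [hm]

lemma step_spec (L : List Int) (x : Int) (hx1 : x ≠ 1) (hx0 : x ≠ 0) :
    pvStepB (pvStSpec L) x = pvStSpec (L ++ [x]) := by
  have hcond : (x == 1 || x == 0) = false := by simp [hx1, hx0]
  unfold pvStepB pvStSpec
  cases hmin : PySem.List.min? L (fun y => y) with
  | none =>
    have hL : L = [] := (PySem.List.min?_eq_none_iff L _).mp hmin
    subst hL
    simp [hcond, PySem.List.min?_id_cons]
  | some m =>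
    rw [min?_append_singleton L x m hmin]
    have hmem : ∀ y ∈ L, m ≤ y := by
      intro y hy
      exact PySem.List.min?_isMin hmin y hy
    simp only [hcond, Bool.false_eq_true, if_false]
    by_cases hlt : x < m
    · have hxnot : x ∉ L := fun hmem' => absurd (hmem x hmem') (by omega)
      have hminmx : min m x = x := by omega
      simp [hlt, hminmx, List.count_append, List.count_eq_zero_of_not_mem hxnot]
    · by_cases heq : x = m
      · subst heq
        have hminxx : min x x = x := by omega
        simp [List.count_append]
      · have hminmx : min m x = m := by omega
        have hmne : m ≠ x := fun h => heq h.symm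
        simp [hlt, heq, hminmx, List.count_append]

lemma foldl_stSpec (rest L : List Int) :
    rest.foldl pvStepB (pvStSpec L)
      = pvStSpec (L ++ rest.filter (fun x => decide (x ≠ 1) && decide (x ≠ 0))) := by
  induction rest generalizing L with
  | nil => simp
  | cons x t ih =>
    by_cases hx : x ≠ 1 ∧ x ≠ 0
    · rw [List.foldl_cons, step_spec L x hx.1 hx.2, ih (L ++ [x])]
      have : (x :: t).filter (fun x => decide (x ≠ 1) && decide (x ≠ 0))
          = x :: t.filter (fun x => decide (x ≠ 1) && decide (x ≠ 0)) := by
        simp [hx.1, hx.2]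
      rw [this, List.append_assoc]
      rfl
    · have hx' : x = 1 ∨ x = 0 := by tauto
      have hstep : pvStepB (pvStSpec L) x = pvStSpec L := by
        unfold pvStepB
        rcases hx' with h | h <;> simp [h]
      have hfil : (x :: t).filter (fun x => decide (x ≠ 1) && decide (x ≠ 0))
          = t.filter (fun x => decide (x ≠ 1) && decide (x ≠ 0)) := by
        rcases hx' with h | h <;> simp [h]
      rw [List.foldl_cons, hstep, ih L, hfil]

-- counting the min in the full composition equals counting it in the filtered list
lemma count_full_eq_count_filter (composition : List Int) (m : Int)
    (h1 : m ≠ 1) (h0 : m ≠ 0) :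
    List.count m composition
      = List.count m (composition.filter (fun x => decide (x ≠ 1) && decide (x ≠ 0))) := by
  rw [List.count_filter]
  simp [h1, h0]

-- ===== VERDICT (by name: the statement is the Claim_ definition above) =====
theorem detect_low_unique_spec : Claim_equal_detect_low_unique := by
  intro composition _
  unfold Spec_detect_low_unique detect_low_unique detect_low_unique_alt
  have hfold : composition.foldl pvStepB (none, 0)
      = pvStSpec (composition.filter (fun x => decide (x ≠ 1) && decide (x ≠ 0))) := by
    have h0 : pvStSpec [] = (none, 0) := by
      unfold pvStSpec
      rw [(PySem.List.min?_eq_none_iff ([] : List Int) (fun x => x)).mpr rfl]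
    rw [← h0, foldl_stSpec composition []]
    simp
  rw [hfold]
  generalize hL : composition.filter (fun x => decide (x ≠ 1) && decide (x ≠ 0)) = L
  unfold pvStSpec
  cases hmin : PySem.List.min? L (fun x => x) with
  | none => simp only [hmin]; simp
  | some m =>
    have hmL : m ∈ L := PySem.List.min?_mem hmin
    have hm : m ≠ 1 ∧ m ≠ 0 := by
      have := List.of_mem_filter (hL ▸ hmL)
      simpa using this
    have hc : List.count m composition = List.count m L := by
      rw [count_full_eq_count_filter composition m hm.1 hm.2, hL]
    simp only [hmin]
    simp only [PySem.List.count_eq, hc]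
    by_cases h1 : List.count m L = 1
    · simp [h1]
    · simp only [h1, Option.isSome_some, Bool.true_and]
      have : ((List.count m L : Int) == 1) = false := by
        simp
        omega
      rw [this]
      decide
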